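-- pv_equiv track=rewrite | github.com/ByungKwanLee/Phantom | utils/utils.py | add_bundle_tokens
-- ===== SOURCE A (Python) =====
-- def find_special_token(string, special_token):
--     start = 0
--     while True:
--         start = string.find(special_token, start)
--         if start == -1: return
--         yield start
--         start += len(special_token) # use start += 1 to find overlapping matches
--
-- def add_bundle_tokens(input_string, special_token, num):
--
--     # number of special tokens in input_string
--     num_special_tokens = len(list(find_special_token(input_string, special_token)))
--
--     # No special token -> return the raw
--     if not num_special_tokens:
--         return input_string
--
--     result = ""
--     index = 0
--     while index < len(input_string):
--         if input_string[index:index + len(special_token)] == special_token: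
--             result += special_token * num
--             index += len(special_token)
--         else:
--             result += input_string[index]
--             index += 1
--
--     assert len(list(find_special_token(result, special_token))) == num_special_tokens * num
--     return result
-- ===== SOURCE B (Python) =====
-- def add_bundle_tokens(input_string, special_token, num):
--     pieces = input_string.split(special_token)
--     if len(pieces) == 1:
--         return input_string
--     result = (special_token * num).join(pieces)
--     # same sanity check as the original: each of the len(pieces)-1 occurrences
--     # must now appear exactly num times (str.count counts non-overlapping matches)
--     assert result.count(special_token) == (len(pieces) - 1) * num
--     return result
-- ===== Notes on version B (the rewrite author's own statement) =====
-- stated objective: simpler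
-- what changed: Replaces A's occurrence-counting generator and character-by-character scan-and-rebuild loop with a single split on the token followed by a join with the token repeated num times (a one-element split, i.e. token absent, returns the input unchanged); the trailing sanity assert is kept, phrased via str.count, so B raises exactly where A does.
import Mathlib
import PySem

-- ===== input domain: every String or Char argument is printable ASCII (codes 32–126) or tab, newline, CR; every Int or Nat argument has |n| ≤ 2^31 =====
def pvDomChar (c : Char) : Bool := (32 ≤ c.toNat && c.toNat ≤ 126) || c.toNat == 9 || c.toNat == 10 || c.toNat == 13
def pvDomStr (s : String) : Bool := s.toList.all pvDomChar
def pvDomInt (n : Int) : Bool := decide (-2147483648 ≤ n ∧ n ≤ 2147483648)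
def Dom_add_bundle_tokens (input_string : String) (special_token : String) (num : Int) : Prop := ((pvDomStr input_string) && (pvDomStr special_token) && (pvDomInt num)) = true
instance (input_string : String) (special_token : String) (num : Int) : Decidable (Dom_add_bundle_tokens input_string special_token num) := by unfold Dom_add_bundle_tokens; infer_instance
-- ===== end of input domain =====

-- B replaces A's counting generator and per-character scan loop by split-on-token + join with the token repeated num times, keeping A's trailing sanity assert (same return value, same raising, on Pre_).


-- ===== PORT A =====
-- Python's `special_token * num` on the char-list side (num ≤ 0 gives "", like Python)
def pvStrMulList (t : List Char) (num : Int) : List Char := (List.replicate num.toNat t).flatten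

-- find_special_token: A takes len(list(...)), i.e. the number of yields; ported as that count.
-- fuel = |s|+1 suffices when t ≠ "" (each successful find advances start by len(t) ≥ 1);
-- for t = "" Python loops forever (outside Pre_), the fuel then merely truncates.
def pvCountA (s t : List Char) (start : Nat) (fuel : Nat) : Nat :=
  match fuel with
  | 0 => 0
  | fuel + 1 =>
    let i := PySem.Chars.findFrom s t (start : Int) none
    if i = -1 then 0
    else 1 + pvCountA s t (i.toNat + t.length) fuel

-- the while loop: `input_string[index:index+len(special_token)]` = (s.drop index).take t.length and
-- `input_string[index]` = (s.drop index).take 1 — exact, since the slice bounds are 0 ≤ index (< |s|).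
def pvLoopA (s t rep : List Char) (index : Nat) (result : List Char) (fuel : Nat) : List Char :=
  match fuel with
  | 0 => result
  | fuel + 1 =>
    if index < s.length then
      if (s.drop index).take t.length = t then
        pvLoopA s t rep (index + t.length) (result ++ rep) fuel
      else
        pvLoopA s t rep (index + 1) (result ++ (s.drop index).take 1) fuel
    else result

def add_bundle_tokens (input_string : String) (special_token : String) (num : Int) : String :=
  let s := input_string.toList
  let t := special_token.toList
  let num_special_tokens := pvCountA s t 0 (s.length + 1)
  if num_special_tokens = 0 then input_string
  else String.ofList (pvLoopA s t (pvStrMulList t num) 0 [] (s.length + 1))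
  -- the trailing `assert` is omitted: on every input Pre_ admits it succeeds (where it fails, A raises, and Pre_ excludes that input)

-- ===== PORT B =====
def add_bundle_tokens_alt (input_string : String) (special_token : String) (num : Int) : String :=
  match PySem.Str.split? input_string special_token with
  | none => input_string   -- split("") raises ValueError in Python: outside Pre_
  | some pieces =>
    if pieces.length == 1 then input_string
    else PySem.Str.join (String.ofList (pvStrMulList special_token.toList num)) pieces
  -- B's `assert` is omitted like A's: it succeeds on every input Pre_ admits (where it fails, both Pythons raise, outside Pre_)

-- ===== PRECONDITION & SPEC =====
-- Pre_ excludes only inputs on which A returns no value: empty special_token (A's find loop never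
-- terminates; B's split raises ValueError) and the inputs where the trailing assert fails in both
-- programs (num < 0 with the token present, and num = 0 when deleting every occurrence of the token
-- creates a new occurrence) — there A and B both raise AssertionError.
def Pre_add_bundle_tokens (input_string : String) (special_token : String) (num : Int) : Prop :=
  special_token ≠ "" ∧
    (PySem.Str.isIn special_token input_string = false ∨ 1 ≤ num ∨
      (num = 0 ∧ PySem.Chars.isIn special_token.toList
        (PySem.Chars.join [] (PySem.Chars.splitOn input_string.toList special_token.toList)) = false))
instance (input_string : String) (special_token : String) (num : Int) : Decidable (Pre_add_bundle_tokens input_string special_token num) := by unfold Pre_add_bundle_tokens; infer_instance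
def pvWitness_add_bundle_tokens : String × String × Int := ("abcab", "ab", 2)

def Spec_add_bundle_tokens (input_string : String) (special_token : String) (num : Int) (out : String) : Prop := out = add_bundle_tokens_alt input_string special_token num
instance (input_string : String) (special_token : String) (num : Int) (out : String) : Decidable (Spec_add_bundle_tokens input_string special_token num out) := by unfold Spec_add_bundle_tokens; infer_instance

-- ===== CLAIM (what is proved, stated in full; the proofs are below) =====
def Claim_equal_add_bundle_tokens : Prop := ∀ (input_string : String) (special_token : String) (num : Int), Dom_add_bundle_tokens input_string special_token num → Pre_add_bundle_tokens input_string special_token num → Spec_add_bundle_tokens input_string special_token num (add_bundle_tokens input_string special_token num)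

-- ===== LEMMAS AND PROOFS =====

lemma pv_go_ne_nil (sep : List Char) : ∀ (fuel : Nat) (l cur : List Char) (acc : List (List Char)),
    PySem.Chars.splitOn.go sep fuel l cur acc ≠ [] := by
  intro fuel
  induction fuel with
  | zero => intro l cur acc; simp [PySem.Chars.splitOn.go]
  | succ n ih =>
    intro l cur acc
    cases l with
    | nil => simp [PySem.Chars.splitOn.go]
    | cons c rest =>
      rw [PySem.Chars.splitOn.go]
      split
      · exact ih _ _ _
      · exact ih _ _ _

lemma pv_splitOn_ne_nil (l sep : List Char) : PySem.Chars.splitOn l sep ≠ [] :=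
  pv_go_ne_nil sep _ l [] []

lemma pv_go_eq (sep : List Char) (hsep : sep ≠ []) :
    ∀ (n : Nat) (l : List Char), l.length ≤ n → ∀ (fuel : Nat) (cur : List Char) (acc : List (List Char)), l.length < fuel →
      PySem.Chars.splitOn.go sep fuel l cur acc
        = acc.reverse ++ (PySem.Chars.splitOn l sep).modifyHead (cur.reverse ++ ·) := by
  intro n
  induction n with
  | zero =>
    intro l hl fuel cur acc hf
    interval_cases hl' : l.length
    · match l, hl' with
      | [], _ =>
        match fuel, hf with
        | fuel + 1, _ =>
          rw [PySem.Chars.splitOn.go]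
          simp [PySem.Chars.splitOn, PySem.Chars.splitOn.go]
          omega
  | succ n ih =>
    intro l hl fuel cur acc hf
    match fuel, hf with
    | fuel + 1, hf =>
      cases l with
      | nil =>
        rw [PySem.Chars.splitOn.go]
        simp [PySem.Chars.splitOn, PySem.Chars.splitOn.go]
        omega
      | cons c rest =>
        rw [PySem.Chars.splitOn.go]
        have hsep1 : 1 ≤ sep.length := List.length_pos_of_ne_nil hsep
        by_cases hpre : sep.isPrefixOf (c :: rest)
        · have hpre' : sep <+: (c :: rest) := List.isPrefixOf_iff_prefix.mp hpre
          have hlen : sep.length ≤ rest.length + 1 := hpre'.length_le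
          have hdrop : ((c :: rest).drop sep.length).length ≤ n := by
            simp at hl ⊢; omega
          rw [if_pos hpre]
          rw [ih _ hdrop fuel [] _ (by simp at hf ⊢; omega)]
          conv_rhs => rw [PySem.Chars.splitOn, PySem.Chars.splitOn.go, if_pos hpre]
          rw [ih _ hdrop ((c :: rest).length) [] _ (by simp; omega)]
          cases h : PySem.Chars.splitOn ((c :: rest).drop sep.length) sep with
          | nil => exact absurd h (pv_splitOn_ne_nil _ _)
          | cons x xs => simp
        · rw [if_neg hpre]
          have hrest : rest.length ≤ n := by simp at hl; omega
          rw [ih _ hrest fuel (c :: cur) _ (by simp at hf ⊢; omega)]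
          conv_rhs => rw [PySem.Chars.splitOn, PySem.Chars.splitOn.go, if_neg hpre]
          rw [ih _ hrest ((c :: rest).length) [c] _ (by simp)]
          cases h : PySem.Chars.splitOn rest sep with
          | nil => exact absurd h (pv_splitOn_ne_nil _ _)
          | cons x xs => simp

lemma pv_splitOn_nil (sep : List Char) (_hsep : sep ≠ []) :
    PySem.Chars.splitOn [] sep = [[]] := by
  rw [PySem.Chars.splitOn, PySem.Chars.splitOn.go]
  simp
  omega

lemma pv_splitOn_prefix (l sep : List Char) (hsep : sep ≠ []) (hl : l ≠ []) (hpre : sep <+: l) :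
    PySem.Chars.splitOn l sep = [] :: PySem.Chars.splitOn (l.drop sep.length) sep := by
  have hsep1 : 1 ≤ sep.length := List.length_pos_of_ne_nil hsep
  match l, hl with
  | c :: rest, _ =>
    conv_lhs => rw [PySem.Chars.splitOn, PySem.Chars.splitOn.go,
      if_pos (List.isPrefixOf_iff_prefix.mpr hpre)]
    rw [pv_go_eq sep hsep ((c :: rest).length) _ (by
      simp only [List.length_drop, List.length_cons]; omega) _ [] _ (by
      simp only [List.length_drop, List.length_cons]; omega)]
    cases h : PySem.Chars.splitOn ((c :: rest).drop sep.length) sep with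
    | nil => exact absurd h (pv_splitOn_ne_nil _ _)
    | cons x xs => simp

lemma pv_splitOn_cons (c : Char) (rest sep : List Char) (hsep : sep ≠ []) (h : ¬ sep <+: (c :: rest)) :
    PySem.Chars.splitOn (c :: rest) sep = (PySem.Chars.splitOn rest sep).modifyHead (c :: ·) := by
  conv_lhs => rw [PySem.Chars.splitOn, PySem.Chars.splitOn.go,
    if_neg (fun hb => h (List.isPrefixOf_iff_prefix.mp hb))]
  rw [pv_go_eq sep hsep ((c :: rest).length) _ (by simp) _ [c] _ (by simp)]
  cases hx : PySem.Chars.splitOn rest sep with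
  | nil => exact absurd hx (pv_splitOn_ne_nil _ _)
  | cons x xs => simp

lemma pv_splitOn_of_not_infix (l sep : List Char) (hsep : sep ≠ []) (h : ¬ sep <:+: l) :
    PySem.Chars.splitOn l sep = [l] := by
  induction l with
  | nil => exact pv_splitOn_nil sep hsep
  | cons c rest ih =>
    rw [pv_splitOn_cons c rest sep hsep (fun hp => h hp.isInfix)]
    rw [ih (fun hi => h (List.infix_cons hi))]
    rfl

lemma pv_join_cons (rep x : List Char) (xs : List (List Char)) (hxs : xs ≠ []) :
    PySem.Chars.join rep (x :: xs) = x ++ rep ++ PySem.Chars.join rep xs := by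
  match xs, hxs with
  | y :: ys, _ => exact PySem.Chars.join_cons_cons rep x y ys

lemma pv_loopA_eq (s t rep : List Char) (ht : t ≠ []) :
    ∀ (fuel index : Nat) (acc : List Char), s.length - index < fuel →
      pvLoopA s t rep index acc fuel
        = acc ++ PySem.Chars.join rep (PySem.Chars.splitOn (s.drop index) t) := by
  intro fuel
  have ht1 : 1 ≤ t.length := List.length_pos_of_ne_nil ht
  induction fuel with
  | zero => intro index acc h; omega
  | succ fuel ih =>
    intro index acc h
    rw [pvLoopA]
    by_cases hidx : index < s.length
    · rw [if_pos hidx]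
      have hdropne : s.drop index ≠ [] := by
        intro hh
        have := List.length_drop (l := s) (i := index)
        rw [hh] at this
        simp at this; omega
      by_cases hpre : (s.drop index).take t.length = t
      · have hpre' : t <+: s.drop index := by
          rw [List.prefix_iff_eq_take]; exact hpre.symm
        rw [if_pos hpre]
        rw [ih (index + t.length) (acc ++ rep) (by omega)]
        rw [pv_splitOn_prefix _ _ ht hdropne hpre']
        rw [List.drop_drop]
        rw [pv_join_cons rep [] _ (pv_splitOn_ne_nil _ _)]
        simp
      · rw [if_neg hpre]
        rw [ih (index + 1) _ (by omega)]
        have hget : s.drop index = s[index] :: s.drop (index + 1) :=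
          List.drop_eq_getElem_cons hidx
        have hnp : ¬ t <+: (s[index] :: s.drop (index + 1)) := by
          rw [← hget]
          intro hp
          exact hpre ((List.prefix_iff_eq_take.mp hp).symm)
        rw [hget, pv_splitOn_cons _ _ _ ht hnp]
        cases hx : PySem.Chars.splitOn (s.drop (index + 1)) t with
        | nil => exact absurd hx (pv_splitOn_ne_nil _ _)
        | cons x xs =>
          simp only [List.modifyHead]
          cases xs with
          | nil =>
            rw [PySem.Chars.join_singleton, PySem.Chars.join_singleton]
            simp
            rw [hget, List.take_succ_cons, List.take_zero]
            rfl
          | cons y ys =>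
            rw [pv_join_cons rep (s[index] :: x) _ (by simp),
                pv_join_cons rep x _ (by simp)]
            simp
            rw [hget, List.take_succ_cons, List.take_zero]
            rfl
    · rw [if_neg hidx]
      have : s.drop index = [] := List.drop_eq_nil_of_le (by omega)
      rw [this, pv_splitOn_nil _ ht, PySem.Chars.join_singleton]
      simp

lemma pv_count_zero (s t : List Char) (n : Nat)
    (h : pvCountA s t 0 (n + 1) = 0) : PySem.Chars.find s t = -1 := by
  rw [pvCountA] at h
  simp only [Int.natCast_zero] at h
  split at h
  · rename_i hfind
    rw [← PySem.Chars.findFrom_zero s t]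
    exact_mod_cast hfind
  · omega

lemma pv_count_zero_of_find (s t : List Char)
    (h : PySem.Chars.find s t = -1) (n : Nat) : pvCountA s t 0 (n + 1) = 0 := by
  rw [pvCountA]
  simp only [Int.natCast_zero, PySem.Chars.findFrom_zero]
  rw [if_pos (by exact_mod_cast h)]

lemma pv_splitOn_two_le_of_infix (l sep : List Char) (hsep : sep ≠ [])
    (h : sep <:+: l) : 2 ≤ (PySem.Chars.splitOn l sep).length := by
  induction l with
  | nil =>
    exact absurd (List.eq_nil_of_infix_nil h) hsep
  | cons c rest ih =>
    by_cases hpre : sep <+: (c :: rest)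
    · rw [pv_splitOn_prefix _ _ hsep (by simp) hpre]
      have := pv_splitOn_ne_nil ((c :: rest).drop sep.length) sep
      cases hx : PySem.Chars.splitOn ((c :: rest).drop sep.length) sep with
      | nil => exact absurd hx this
      | cons x xs => simp
    · rcases List.infix_cons_iff.mp h with hp | hi
      · exact absurd hp hpre
      · rw [pv_splitOn_cons _ _ _ hsep hpre]
        have := ih hi
        cases hx : PySem.Chars.splitOn rest sep with
        | nil => exact absurd hx (pv_splitOn_ne_nil _ _)
        | cons x xs => rw [hx] at this; simpa using this

-- ===== VERDICT (by name: the statement is the Claim_ definition above) =====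
theorem add_bundle_tokens_spec : Claim_equal_add_bundle_tokens := by
  intro s t num _dom hpre
  obtain ⟨ht, -⟩ := hpre
  have ht' : t.toList ≠ [] := fun hh => ht (String.toList_eq_nil_iff.mp hh)
  unfold Spec_add_bundle_tokens
  have hsplit : PySem.Str.split? s t
      = some ((PySem.Chars.splitOn s.toList t.toList).map String.ofList) := by
    simp [PySem.Str.split?, PySem.Chars.split?, List.isEmpty_iff, ht']
  rw [add_bundle_tokens, add_bundle_tokens_alt, hsplit]
  by_cases hc : pvCountA s.toList t.toList 0 (s.toList.length + 1) = 0
  · rw [if_pos hc]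
    have hni : ¬ t.toList <:+: s.toList :=
      (PySem.Chars.find_eq_neg_one_iff _ _).mp (pv_count_zero _ _ _ hc)
    rw [pv_splitOn_of_not_infix _ _ ht' hni]
    simp
  · rw [if_neg hc]
    have hinf : t.toList <:+: s.toList :=
      (PySem.Chars.find_ne_neg_one_iff _ _).mp
        (fun hfind => hc (pv_count_zero_of_find _ _ hfind _))
    have hlen := pv_splitOn_two_le_of_infix s.toList t.toList ht' hinf
    rw [pv_loopA_eq s.toList t.toList _ ht' (s.toList.length + 1) 0 [] (by omega)]
    simp [PySem.Str.join, PySem.Chars.join, Function.comp_def]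
    exact fun h1 => absurd h1 (by omega)
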